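-- pv_equiv track=rewrite | github.com/ptarau/PythonProvers | hprovers.py | part2list_
-- ===== SOURCE A (Python) =====
-- def part2list_(N, pss):
--     res = []
--     l = len(pss)
--     for i in range(N):
--         for j in range(l):
--             if i in pss[j]:
--                 res.append(j)
--     return res
-- ===== SOURCE B (Python) =====
-- def part2list_(N, pss):
--     idx = {}
--     for j, ps in enumerate(pss):
--         for x in set(ps):
--             idx.setdefault(x, []).append(j)
--     return [j for i in range(N) for j in idx.get(i, [])]
-- ===== Notes on version B (the rewrite author's own statement) =====
-- stated objective: faster
-- what changed: Instead of scanning every partition list for membership of every i (nested loops with an inner 'in' scan), B builds an inverse index element->list of partition indices in one pass over the partitions (deduping each partition with set) and then emits the index entry for each i.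
import Mathlib
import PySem

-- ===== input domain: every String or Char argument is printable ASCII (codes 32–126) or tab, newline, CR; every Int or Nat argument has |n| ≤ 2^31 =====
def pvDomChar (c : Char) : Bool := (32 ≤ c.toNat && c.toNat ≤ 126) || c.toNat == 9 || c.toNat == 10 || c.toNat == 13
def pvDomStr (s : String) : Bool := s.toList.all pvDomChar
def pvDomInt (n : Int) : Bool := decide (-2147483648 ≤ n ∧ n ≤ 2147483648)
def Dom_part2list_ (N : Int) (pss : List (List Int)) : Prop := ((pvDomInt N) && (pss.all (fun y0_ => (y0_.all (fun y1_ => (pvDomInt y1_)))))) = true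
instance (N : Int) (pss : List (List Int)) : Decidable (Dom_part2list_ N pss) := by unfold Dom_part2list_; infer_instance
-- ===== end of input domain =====

-- B replaces A's nested membership scans by an inverse index element -> partition
-- indices built once, then emits the index entry for each i (objective: faster).

-- ===== PORT A =====
-- 'for j in range(l): if i in pss[j]: res.append(j)' as a fold over the indexed partitions
def part2list_ (N : Int) (pss : List (List Int)) : List Int :=
  (PySem.List.pyRange 0 N 1).foldl
    (fun res i =>
      (PySem.List.enumerate pss).foldl
        (fun res jp => if i ∈ jp.2 then res ++ [jp.1] else res) res)
    []

-- ===== PORT B =====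
-- idx.setdefault(x, []).append(j) for each x in set(ps)
def part2listIdx (pss : List (List Int)) : PySem.Dict Int (List Int) :=
  (PySem.List.enumerate pss).foldl
    (fun d jp =>
      (PySem.Set.ofList jp.2).foldl
        (fun d x => d.insert x (d.getD x [] ++ [jp.1])) d)
    PySem.Dict.empty

def part2list__alt (N : Int) (pss : List (List Int)) : List Int :=
  let idx := part2listIdx pss
  (PySem.List.pyRange 0 N 1).flatMap (fun i => idx.getD i [])

-- ===== PRECONDITION & SPEC =====
def Spec_part2list_ (N : Int) (pss : List (List Int)) (out : List Int) : Prop := out = part2list__alt N pss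
instance (N : Int) (pss : List (List Int)) (out : List Int) : Decidable (Spec_part2list_ N pss out) := by unfold Spec_part2list_; infer_instance

-- ===== CLAIM (what is proved, stated in full; the proofs are below) =====
def Claim_equal_part2list_ : Prop := ∀ (N : Int) (pss : List (List Int)), Dom_part2list_ N pss → Spec_part2list_ N pss (part2list_ N pss)

-- ===== LEMMAS AND PROOFS =====

-- the partition indices containing i, in order, over an indexed list of partitions
def pvHits (i : Int) : List (Int × List Int) → List Int
  | [] => []
  | jp :: l => (if i ∈ jp.2 then [jp.1] else []) ++ pvHits i l

theorem pvHits_foldl (i : Int) (l : List (Int × List Int)) (acc : List Int) :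
    l.foldl (fun res jp => if i ∈ jp.2 then res ++ [jp.1] else res) acc
      = acc ++ pvHits i l := by
  induction l generalizing acc with
  | nil => simp [pvHits]
  | cons jp l ih =>
    simp only [List.foldl_cons, pvHits, ih]
    split <;> simp

-- one partition's update touches key x only; over a Nodup list each key gains jp.1 at most once
theorem pvInner_getD (xs : List Int) (j : Int) (d : PySem.Dict Int (List Int))
    (i : Int) (h : xs.Nodup) :
    (xs.foldl (fun d x => d.insert x (d.getD x [] ++ [j])) d).getD i []
      = if i ∈ xs then d.getD i [] ++ [j] else d.getD i [] := by
  induction xs generalizing d with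
  | nil => simp
  | cons x xs ih =>
    simp only [List.foldl_cons]
    rw [ih _ (h.of_cons)]
    by_cases hix : i ∈ xs
    · have hxne : i ≠ x := by rintro rfl; exact (List.nodup_cons.mp h).1 hix
      simp [hix, hxne, PySem.Dict.getD_insert]
    · by_cases hx : i = x
      · subst hx; simp [hix]
      · simp [hix, hx, PySem.Dict.getD_insert]

theorem pvIdx_getD (l : List (Int × List Int)) (d : PySem.Dict Int (List Int)) (i : Int) :
    (l.foldl
        (fun d jp =>
          (PySem.Set.ofList jp.2).foldl
            (fun d x => d.insert x (d.getD x [] ++ [jp.1])) d) d).getD i []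
      = d.getD i [] ++ pvHits i l := by
  induction l generalizing d with
  | nil => simp [pvHits]
  | cons jp l ih =>
    simp only [List.foldl_cons, pvHits, ih]
    rw [pvInner_getD _ _ _ _ (PySem.Set.nodup_ofList _)]
    by_cases hi : i ∈ jp.2 <;> simp [hi, PySem.Set.mem_ofList]

theorem pvAlt_getD (pss : List (List Int)) (i : Int) :
    (part2listIdx pss).getD i [] = pvHits i (PySem.List.enumerate pss) := by
  simpa using pvIdx_getD (PySem.List.enumerate pss) PySem.Dict.empty i

-- ===== VERDICT (by name: the statement is the Claim_ definition above) =====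
theorem part2list__spec : Claim_equal_part2list_ := by
  intro N pss _
  unfold Spec_part2list_ part2list_ part2list__alt
  simp only [pvHits_foldl, pvAlt_getD]
  exact (PySem.List.foldl_append_eq_flatMap _ _ _).trans (by simp)
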